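-- pv_equiv track=rewrite | github.com/meanang123/prmax | prmax/prmax/utilities3/common/string.py | splitoutletname2
-- ===== SOURCE A (Python) =====
-- _remove2 = u"()&\\"
--
-- SplitCharList = u";:,/-"
--
-- REPLACEWITHSPACE = (u'\t', )
--
-- def splitoutletname2(name):
-- 	""" Split an outlet name into a list of words"""
--
-- 	for c in _remove2:
-- 		name = name.replace(c,"")
--
-- 	for c in REPLACEWITHSPACE:
-- 		name = name.replace(c, " ")
--
-- 	t2 = ""
-- 	for c in name:
-- 		try:
-- 			tmp = ord(c)
-- 			if tmp >=31 and tmp <=127: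
-- 				t2 += c
-- 		except: pass
--
-- 	name = t2
--
-- 	for c in SplitCharList:
-- 		name = name.replace(c," ")
--
--
-- 	return name.lower().split()
-- ===== SOURCE B (Python) =====
-- _remove2 = u"()&\\"
--
-- SplitCharList = u";:,/-"
--
-- def splitoutletname2(name):
-- 	""" Split an outlet name into a list of words (single-pass classification)"""
-- 	out = []
-- 	for c in name:
-- 		if c in _remove2:
-- 			continue
-- 		elif c == '\t' or c in SplitCharList:
-- 			out.append(' ')
-- 		elif 31 <= ord(c) <= 127:
-- 			out.append(c)
-- 	return ''.join(out).lower().split()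
-- ===== Notes on version B (the rewrite author's own statement) =====
-- stated objective: simpler
-- what changed: Replaces A's four sequential passes (per-character replace loops plus an ord-filter pass, each rescanning the whole string) with a single loop that classifies each character once (delete, space, keep, or drop) before the final lower/split.
import Mathlib
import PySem

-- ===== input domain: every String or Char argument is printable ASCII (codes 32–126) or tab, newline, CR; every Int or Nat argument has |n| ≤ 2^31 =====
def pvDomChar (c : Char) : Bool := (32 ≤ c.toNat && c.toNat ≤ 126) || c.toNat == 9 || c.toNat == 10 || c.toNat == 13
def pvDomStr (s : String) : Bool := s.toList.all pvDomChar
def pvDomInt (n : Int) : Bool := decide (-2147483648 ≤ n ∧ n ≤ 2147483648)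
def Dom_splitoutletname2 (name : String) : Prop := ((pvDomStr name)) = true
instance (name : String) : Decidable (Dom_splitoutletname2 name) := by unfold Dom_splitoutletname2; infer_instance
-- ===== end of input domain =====

-- B replaces A's four sequential replace/filter passes with one per-character classification pass (objective: simpler).


-- module constants (_remove2, SplitCharList, REPLACEWITHSPACE)
def pvRemove2 : List Char := ['(', ')', '&', '\\']
def pvSplitCharList : List Char := [';', ':', ',', '/', '-']
def pvReplaceWithSpace : List Char := ['\t']

-- ===== PORT A =====
def splitoutletname2 (name : String) : List String :=
  let n1 := pvRemove2.foldl (fun s c => PySem.Chars.replace s [c] []) name.toList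
  let n2 := pvReplaceWithSpace.foldl (fun s c => PySem.Chars.replace s [c] [' ']) n1
  let t2 := n2.foldl (fun acc c => if 31 ≤ c.toNat ∧ c.toNat ≤ 127 then acc ++ [c] else acc) ([] : List Char)
  let n3 := pvSplitCharList.foldl (fun s c => PySem.Chars.replace s [c] [' ']) t2
  (PySem.Chars.split₀ (PySem.Chars.lower n3)).map String.ofList

-- ===== PORT B =====
def splitoutletname2_alt (name : String) : List String :=
  let out := name.toList.foldl (fun acc c =>
    if c ∈ pvRemove2 then acc
    else if c = '\t' ∨ c ∈ pvSplitCharList then acc ++ [' ']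
    else if 31 ≤ c.toNat ∧ c.toNat ≤ 127 then acc ++ [c]
    else acc) ([] : List Char)
  (PySem.Chars.split₀ (PySem.Chars.lower out)).map String.ofList

-- ===== PRECONDITION & SPEC =====
def Spec_splitoutletname2 (name : String) (out : List String) : Prop := out = splitoutletname2_alt name
instance (name : String) (out : List String) : Decidable (Spec_splitoutletname2 name out) := by unfold Spec_splitoutletname2; infer_instance

-- ===== CLAIM (what is proved, stated in full; the proofs are below) =====
def Claim_equal_splitoutletname2 : Prop := ∀ (name : String), Dom_splitoutletname2 name → Spec_splitoutletname2 name (splitoutletname2 name)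

-- ===== LEMMAS AND PROOFS =====

-- str.replace with a one-char pattern, character by character (loop invariant of replace.go)
lemma go_single (c : Char) (new : List Char) :
    ∀ (l : List Char) (fuel : Nat) (acc : List Char), l.length ≤ fuel →
      PySem.Chars.replace.go [c] new fuel l acc
        = acc.reverse ++ l.flatMap (fun x => if x = c then new else [x]) := by
  intro l
  induction l with
  | nil =>
      intro fuel acc _
      cases fuel <;> simp [PySem.Chars.replace.go]
  | cons x t ih =>
      intro fuel acc h
      cases fuel with
      | zero => simp at h
      | succ f =>
        rw [PySem.Chars.replace.go]
        simp only [List.isPrefixOf, List.length_cons] at *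
        by_cases hx : x = c
        · simp [hx, ih f (new.reverse ++ acc) (by omega)]
        · simp [hx, Ne.symm hx, ih f (x :: acc) (by omega)]

-- s.replace(c, new) for a single character c is a per-character flatMap
lemma replace_single (s : List Char) (c : Char) (new : List Char) :
    PySem.Chars.replace s [c] new = s.flatMap (fun x => if x = c then new else [x]) := by
  rw [PySem.Chars.replace]
  simp [go_single c new s s.length [] (le_refl _)]

-- ===== VERDICT =====
theorem splitoutletname2_spec : Claim_equal_splitoutletname2 := by
  intro name _
  unfold Spec_splitoutletname2 splitoutletname2 splitoutletname2_alt
  have hf : (fun (acc : List Char) (c : Char) => if 31 ≤ c.toNat ∧ c.toNat ≤ 127 then acc ++ [c] else acc)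
      = fun acc c => acc ++ (if 31 ≤ c.toNat ∧ c.toNat ≤ 127 then [c] else []) := by
    funext acc c; split_ifs <;> simp
  have hg : (fun (acc : List Char) (c : Char) =>
      if c ∈ pvRemove2 then acc
      else if c = '\t' ∨ c ∈ pvSplitCharList then acc ++ [' ']
      else if 31 ≤ c.toNat ∧ c.toNat ≤ 127 then acc ++ [c]
      else acc)
      = fun acc c => acc ++ (if c ∈ pvRemove2 then []
        else if c = '\t' ∨ c ∈ pvSplitCharList then [' ']
        else if 31 ≤ c.toNat ∧ c.toNat ≤ 127 then [c]
        else []) := by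
    funext acc c; split_ifs <;> simp
  rw [hf, hg]
  simp only [pvRemove2, pvSplitCharList, pvReplaceWithSpace, List.foldl_cons, List.foldl_nil,
    replace_single, PySem.List.foldl_append_eq_flatMap, List.flatMap_assoc, List.nil_append]
  congr 3
  apply List.flatMap_congr
  intro x _
  by_cases h1 : x = '(';  · subst h1; decide
  by_cases h2 : x = ')';  · subst h2; decide
  by_cases h3 : x = '&';  · subst h3; decide
  by_cases h4 : x = '\\'; · subst h4; decide
  by_cases h5 : x = '\t'; · subst h5; decide
  by_cases h6 : x = ';';  · subst h6; decide
  by_cases h7 : x = ':';  · subst h7; decide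
  by_cases h8 : x = ',';  · subst h8; decide
  by_cases h9 : x = '/';  · subst h9; decide
  by_cases h10 : x = '-'; · subst h10; decide
  by_cases hr : 31 ≤ x.toNat ∧ x.toNat ≤ 127 <;>
    simp [h1, h2, h3, h4, h5, h6, h7, h8, h9, h10, hr]
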